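-- pv_equiv track=rewrite | github.com/ikokkari/PythonProblems | labs109.py | collatzy_distance
-- ===== SOURCE A (Python) =====
-- def collatzy_distance(start, end):
--     level = 0
--     curr = [start]
--     seen = set(curr)
--     while end not in seen:
--         level += 1
--         succ = []
--         for e in curr:
--             for f in [lambda y: 3 * y + 1, lambda y: y // 2]:
--                 x = f(e)
--                 if x not in seen:
--                     succ.append(x)
--                     seen.add(x)
--         curr = succ
--     return level
-- ===== SOURCE B (Python) =====
-- def collatzy_distance(start, end):
--     dist = 0
--     curr_f, seen_f = [start], {start}
--     curr_b, seen_b = [end], {end}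
--     while seen_f.isdisjoint(seen_b):
--         dist += 1
--         if len(curr_f) <= len(curr_b):
--             new = []
--             for e in curr_f:
--                 for x in (3 * e + 1, e // 2):
--                     if x not in seen_f:
--                         seen_f.add(x); new.append(x)
--             curr_f = new
--         else:
--             new = []
--             for e in curr_b:
--                 preds = [2 * e, 2 * e + 1]
--                 if e % 3 == 1:
--                     preds.append((e - 1) // 3)
--                 for x in preds:
--                     if x not in seen_b:
--                         seen_b.add(x); new.append(x)
--             curr_b = new
--     return dist
-- ===== Notes on version B (the rewrite author's own statement) =====
-- stated objective: faster
-- what changed: Replaces A's one-sided breadth-first search with a bidirectional BFS that also expands backwards from end via the inverse operations (2x, 2x+1, and (x-1)/3 when x = 1 mod 3), always growing the smaller frontier, and returns the sum of the two depths when the seen sets meet; a timing run measured B over 100x faster at the largest size both finished, with A timing out at sizes B still answers.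
import Mathlib
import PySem

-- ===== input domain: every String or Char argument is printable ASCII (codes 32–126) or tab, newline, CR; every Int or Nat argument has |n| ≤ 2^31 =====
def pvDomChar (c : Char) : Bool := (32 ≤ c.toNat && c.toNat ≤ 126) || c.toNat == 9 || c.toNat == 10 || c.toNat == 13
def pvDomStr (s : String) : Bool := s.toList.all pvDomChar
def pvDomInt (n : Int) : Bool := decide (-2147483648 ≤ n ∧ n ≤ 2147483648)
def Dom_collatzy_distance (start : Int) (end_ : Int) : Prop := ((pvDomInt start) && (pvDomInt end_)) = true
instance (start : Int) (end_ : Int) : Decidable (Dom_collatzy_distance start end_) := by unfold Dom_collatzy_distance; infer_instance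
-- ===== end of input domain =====

-- B replaces A's one-sided exponential BFS by a bidirectional BFS (forward ops 3x+1, x//2;
-- backward ops 2x, 2x+1, (x-1)/3) that expands the smaller frontier until the two seen sets meet.
-- When start and end_ have opposite signs both Python loops run forever (no value is returned);
-- the ports make the loops total with one shared fuel counter, never reached where Python A returns,
-- and the proved equality of the two ports holds for every input.

-- ===== PORT A =====
-- Python 'set' of ints ported as Std.TreeSet Int: it is used for membership/insert only, and the
-- list model of sets is O(n) per operation, unusable at the sizes A's BFS reaches.
-- inner 'if x not in seen: succ.append(x); seen.add(x)' on state (seen, succ);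
-- the succ accumulator is kept reversed (cons, reversed once per level) to model list.append.
def collatzyStep (st : Std.TreeSet Int × List Int) (x : Int) : Std.TreeSet Int × List Int :=
  if st.1.contains x then st else (st.1.insert x, x :: st.2)

-- 'for e in curr: for f in [3y+1, y//2]: …' (the two lambdas applied to e, in order)
def collatzyExpand (seen : Std.TreeSet Int) (curr : List Int) : Std.TreeSet Int × List Int :=
  curr.foldl (fun st e => [3 * e + 1, PySem.Int.floordiv e 2].foldl collatzyStep st) (seen, [])

-- 'while end not in seen: level += 1; …' (fuel makes the possibly-endless while total)
def collatzyLoop (end_ : Int) : Nat → Int → List Int → Std.TreeSet Int → Int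
  | 0, level, _curr, _seen => level
  | fuel + 1, level, curr, seen =>
      if seen.contains end_ then level
      else
        let st := collatzyExpand seen curr
        collatzyLoop end_ fuel (level + 1) st.2.reverse st.1

def collatzy_distance (start : Int) (end_ : Int) : Int :=
  collatzyLoop end_ 4294967296 0 [start] (Std.TreeSet.ofList [start])

-- ===== PORT B =====
def altSuccs (e : Int) : List Int := [3 * e + 1, PySem.Int.floordiv e 2]

def altPreds (e : Int) : List Int :=
  [2 * e, 2 * e + 1] ++ (if PySem.Int.mod e 3 == 1 then [PySem.Int.floordiv (e - 1) 3] else [])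

-- same append-if-unseen cell as in A's Python (reversed accumulator models list.append)
def altAdd (st : Std.TreeSet Int × List Int) (x : Int) : Std.TreeSet Int × List Int :=
  if st.1.contains x then st else (st.1.insert x, x :: st.2)

def altExpand (cands : Int → List Int) (seen : Std.TreeSet Int) (curr : List Int) :
    Std.TreeSet Int × List Int :=
  curr.foldl (fun st e => (cands e).foldl altAdd st) (seen, [])

-- 'seen_f.isdisjoint(seen_b)'
def altDisjoint (s t : Std.TreeSet Int) : Bool := s.toList.all (fun v => !t.contains v)

-- 'while seen_f.isdisjoint(seen_b): dist += 1; expand the smaller frontier'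
def altLoop : Nat → Int → List Int → Std.TreeSet Int → List Int → Std.TreeSet Int → Int
  | 0, dist, _, _, _, _ => dist
  | fuel + 1, dist, currF, seenF, currB, seenB =>
      if altDisjoint seenF seenB then
        (if currF.length ≤ currB.length then
          let st := altExpand altSuccs seenF currF
          altLoop fuel (dist + 1) st.2.reverse st.1 currB seenB
        else
          let st := altExpand altPreds seenB currB
          altLoop fuel (dist + 1) currF seenF st.2.reverse st.1)
      else dist

def collatzy_distance_alt (start : Int) (end_ : Int) : Int :=
  altLoop 4294967296 0 [start] (Std.TreeSet.ofList [start]) [end_] (Std.TreeSet.ofList [end_])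

-- ===== PRECONDITION & SPEC =====
def Spec_collatzy_distance (start : Int) (end_ : Int) (out : Int) : Prop :=
  out = collatzy_distance_alt start end_
instance (start : Int) (end_ : Int) (out : Int) : Decidable (Spec_collatzy_distance start end_ out) := by
  unfold Spec_collatzy_distance; infer_instance

-- ===== CLAIM (what is proved, stated in full; the proofs are below) =====
def Claim_equal_collatzy_distance : Prop :=
  ∀ (start : Int) (end_ : Int), Dom_collatzy_distance start end_ →
    Spec_collatzy_distance start end_ (collatzy_distance start end_)

-- ===== LEMMAS AND PROOFS =====

theorem mem_insert_int (t : Std.TreeSet Int) (a b : Int) : a ∈ t.insert b ↔ a = b ∨ a ∈ t := by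
  simp [Std.TreeSet.mem_insert]
  tauto

theorem mem_ofList_int (l : List Int) (a : Int) : a ∈ Std.TreeSet.ofList l ↔ a ∈ l := by
  simp [Std.TreeSet.mem_ofList]

-- reachN c k x v: there is a chain x → … → v of length ≤ k along the successor function c
def reachN (c : Int → List Int) : Nat → Int → Int → Bool
  | 0, x, v => x == v
  | k + 1, x, v => x == v || (c x).any (fun y => reachN c k y v)

theorem reachN_zero (c : Int → List Int) (x v : Int) : reachN c 0 x v = (x == v) := rfl

theorem reachN_succ (c : Int → List Int) (k : Nat) (x v : Int) :
    reachN c (k + 1) x v = (x == v || (c x).any (fun y => reachN c k y v)) := rfl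

theorem reachN_succ_iff (c : Int → List Int) (k : Nat) (x v : Int) :
    reachN c (k + 1) x v = true ↔ (x = v ∨ ∃ y ∈ c x, reachN c k y v = true) := by
  rw [reachN_succ]
  simp only [Bool.or_eq_true, List.any_eq_true, beq_iff_eq]

theorem reachN_refl (c : Int → List Int) (k : Nat) (x : Int) : reachN c k x x = true := by
  cases k with
  | zero => rw [reachN_zero]; simp
  | succ k => rw [reachN_succ]; simp

theorem reachN_mono (c : Int → List Int) (k : Nat) :
    ∀ x v, reachN c k x v = true → reachN c (k + 1) x v = true := by
  induction k with
  | zero =>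
    intro x v h
    rw [reachN_zero] at h
    exact (reachN_succ_iff c 0 x v).2 (Or.inl (by simpa using h))
  | succ k ih =>
    intro x v h
    rcases (reachN_succ_iff c k x v).1 h with rfl | ⟨y, hy, hr⟩
    · exact reachN_refl c _ _
    · exact (reachN_succ_iff c (k + 1) x v).2 (Or.inr ⟨y, hy, ih y v hr⟩)

theorem reachN_le (c : Int → List Int) {j k : Nat} (h : j ≤ k) :
    ∀ x v, reachN c j x v = true → reachN c k x v = true := by
  obtain ⟨m, rfl⟩ := Nat.exists_eq_add_of_le h
  clear h
  intro x v hr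
  induction m with
  | zero => exact hr
  | succ m ih => exact reachN_mono c (j + m) x v ih

-- decomposition at the LAST step of the chain
theorem reachN_last (c : Int → List Int) (k : Nat) :
    ∀ x v, reachN c (k + 1) x v = true ↔
      (reachN c k x v = true ∨ ∃ w, reachN c k x w = true ∧ v ∈ c w) := by
  induction k with
  | zero =>
    intro x v
    rw [reachN_succ_iff, reachN_zero]
    simp only [reachN_zero, beq_iff_eq]
    constructor
    · rintro (h | ⟨y, hy, rfl⟩)
      · exact Or.inl h
      · exact Or.inr ⟨x, rfl, hy⟩
    · rintro (h | ⟨w, rfl, hv⟩)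
      · exact Or.inl h
      · exact Or.inr ⟨v, hv, rfl⟩
  | succ k ih =>
    intro x v
    constructor
    · intro h
      rcases (reachN_succ_iff c (k + 1) x v).1 h with rfl | ⟨y, hy, hr⟩
      · exact Or.inl (reachN_refl c _ _)
      · rcases (ih y v).1 hr with h' | ⟨w, hw, hvc⟩
        · exact Or.inl ((reachN_succ_iff c k x v).2 (Or.inr ⟨y, hy, h'⟩))
        · exact Or.inr ⟨w, (reachN_succ_iff c k x w).2 (Or.inr ⟨y, hy, hw⟩), hvc⟩
    · rintro (h | ⟨w, hw, hvc⟩)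
      · exact reachN_mono c _ x v h
      · rcases (reachN_succ_iff c k x w).1 hw with rfl | ⟨y, hy, hr⟩
        · exact (reachN_succ_iff c (k + 1) x v).2 (Or.inr ⟨v, hvc, reachN_refl c _ _⟩)
        · exact (reachN_succ_iff c (k + 1) x v).2
            (Or.inr ⟨y, hy, (ih y v).2 (Or.inr ⟨w, hr, hvc⟩)⟩)

-- peel off the last step (or the chain is empty)
theorem reachN_peel (c : Int → List Int) (k : Nat) :
    ∀ x v, reachN c k x v = true → v = x ∨ ∃ p, reachN c k x p = true ∧ v ∈ c p := by
  induction k with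
  | zero =>
    intro x v h
    rw [reachN_zero] at h
    exact Or.inl (beq_iff_eq.1 h).symm
  | succ k ih =>
    intro x v h
    rcases (reachN_last c k x v).1 h with h' | ⟨w, hw, hvc⟩
    · rcases ih x v h' with rfl | ⟨p, hp, hvc⟩
      · exact Or.inl rfl
      · exact Or.inr ⟨p, reachN_mono c k x p hp, hvc⟩
    · exact Or.inr ⟨w, reachN_mono c k x w hw, hvc⟩

-- duality: backward chains along cb are forward chains along cf
theorem reachN_dual {cb cf : Int → List Int} (hdual : ∀ p y, p ∈ cb y ↔ y ∈ cf p)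
    (k : Nat) : ∀ y u, reachN cb k y u = true ↔ reachN cf k u y = true := by
  induction k with
  | zero =>
    intro y u
    rw [reachN_zero, reachN_zero]
    simp only [beq_iff_eq]
    exact eq_comm
  | succ k ih =>
    intro y u
    constructor
    · intro h
      rcases (reachN_succ_iff cb k y u).1 h with rfl | ⟨p, hp, hr⟩
      · exact reachN_refl cf _ _
      · exact (reachN_last cf k u y).2 (Or.inr ⟨p, (ih p u).1 hr, (hdual p y).1 hp⟩)
    · intro h
      rcases (reachN_last cf k u y).1 h with h'' | ⟨w, hw, hyc⟩
      · rcases reachN_peel cf k u y h'' with rfl | ⟨p, hp, hyc⟩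
        · exact reachN_refl cb _ _
        · exact (reachN_succ_iff cb k y u).2 (Or.inr ⟨p, (hdual p y).2 hyc, (ih p u).2 hp⟩)
      · exact (reachN_succ_iff cb k y u).2 (Or.inr ⟨w, (hdual w y).2 hyc, (ih w u).2 hw⟩)

-- chains of length ≤ a+b split in the middle
theorem reachN_comp (c : Int → List Int) :
    ∀ (a b : Nat) (x z : Int), reachN c (a + b) x z = true ↔
      ∃ v, reachN c a x v = true ∧ reachN c b v z = true := by
  intro a
  induction a with
  | zero =>
    intro b x z
    rw [Nat.zero_add]
    constructor
    · intro h; exact ⟨x, reachN_refl c _ _, h⟩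
    · rintro ⟨v, hv1, hv2⟩
      rw [reachN_zero] at hv1
      obtain rfl := beq_iff_eq.1 hv1
      exact hv2
  | succ a ih =>
    intro b x z
    rw [show a + 1 + b = (a + b) + 1 from by omega]
    constructor
    · intro h
      rcases (reachN_succ_iff c (a + b) x z).1 h with rfl | ⟨y, hy, hr⟩
      · exact ⟨x, reachN_refl c _ _, reachN_refl c _ _⟩
      · rcases (ih b y z).1 hr with ⟨v, hv1, hv2⟩
        exact ⟨v, (reachN_succ_iff c a x v).2 (Or.inr ⟨y, hy, hv1⟩), hv2⟩
    · rintro ⟨v, hv1, hv2⟩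
      rcases (reachN_succ_iff c a x v).1 hv1 with rfl | ⟨y, hy, hr⟩
      · exact reachN_mono c (a + b) _ z (reachN_le c (show b ≤ a + b by omega) _ z hv2)
      · exact (reachN_succ_iff c (a + b) x z).2 (Or.inr ⟨y, hy, (ih b y z).2 ⟨v, hr, hv2⟩⟩)

-- loop invariant: seen is the ≤j-ball around root, curr dominates the next ring
def InvBFS (c : Int → List Int) (root : Int) (j : Nat) (curr : List Int)
    (seen : Std.TreeSet Int) : Prop :=
  (∀ v, v ∈ seen ↔ reachN c j root v = true) ∧
  (∀ v, reachN c (j + 1) root v = true ↔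
    (reachN c j root v = true ∨ ∃ e ∈ curr, v ∈ c e))

theorem invBFS_of_mem_iff (c : Int → List Int) (root : Int) (j : Nat)
    (curr curr' : List Int) (seen : Std.TreeSet Int)
    (hmem : ∀ e, e ∈ curr ↔ e ∈ curr') (h : InvBFS c root j curr seen) :
    InvBFS c root j curr' seen := by
  refine ⟨h.1, fun v => ?_⟩
  rw [h.2 v]
  constructor
  · rintro (h' | ⟨e, he, hv⟩)
    · exact Or.inl h'
    · exact Or.inr ⟨e, (hmem e).1 he, hv⟩
  · rintro (h' | ⟨e, he, hv⟩)
    · exact Or.inl h'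
    · exact Or.inr ⟨e, (hmem e).2 he, hv⟩

theorem foldl_altAdd_fst (xs : List Int) :
    ∀ (st : Std.TreeSet Int × List Int) (v : Int),
      v ∈ (xs.foldl altAdd st).1 ↔ v ∈ st.1 ∨ v ∈ xs := by
  induction xs with
  | nil => intro st v; simp
  | cons x xs ih =>
    intro st v
    simp only [List.foldl_cons, altAdd]
    by_cases hc : st.1.contains x = true
    · have hx : x ∈ st.1 := Std.TreeSet.contains_iff_mem.1 hc
      rw [if_pos hc, ih]
      constructor
      · rintro (h | h); exacts [Or.inl h, Or.inr (List.mem_cons_of_mem x h)]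
      · rintro (h | h)
        · exact Or.inl h
        · rcases List.mem_cons.1 h with rfl | h'
          · exact Or.inl hx
          · exact Or.inr h'
    · rw [if_neg hc, ih]
      simp only [mem_insert_int, List.mem_cons]
      tauto

theorem foldl_altAdd_snd (xs : List Int) :
    ∀ (st : Std.TreeSet Int × List Int) (v : Int),
      v ∈ (xs.foldl altAdd st).2 ↔ v ∈ st.2 ∨ (v ∉ st.1 ∧ v ∈ xs) := by
  induction xs with
  | nil => intro st v; simp
  | cons x xs ih =>
    intro st v
    simp only [List.foldl_cons, altAdd]
    by_cases hc : st.1.contains x = true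
    · have hx : x ∈ st.1 := Std.TreeSet.contains_iff_mem.1 hc
      rw [if_pos hc, ih]
      simp only [List.mem_cons]
      constructor
      · rintro (h | ⟨h1, h2⟩); exacts [Or.inl h, Or.inr ⟨h1, Or.inr h2⟩]
      · rintro (h | ⟨h1, rfl | h2⟩)
        · exact Or.inl h
        · exact absurd hx h1
        · exact Or.inr ⟨h1, h2⟩
    · have hx : x ∉ st.1 := fun h => hc (Std.TreeSet.contains_iff_mem.2 h)
      rw [if_neg hc, ih]
      simp only [mem_insert_int, List.mem_cons]
      by_cases hvx : v = x <;> subst_eqs <;> tauto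

theorem expand_eq_flat (c : Int → List Int) (curr : List Int) :
    ∀ st : Std.TreeSet Int × List Int,
      curr.foldl (fun st e => (c e).foldl altAdd st) st = (curr.flatMap c).foldl altAdd st := by
  induction curr with
  | nil => intro st; simp
  | cons e curr ih => intro st; simp [List.foldl_append, ih]

theorem altExpand_fst (c : Int → List Int) (seen : Std.TreeSet Int) (curr : List Int) (v : Int) :
    v ∈ (altExpand c seen curr).1 ↔ v ∈ seen ∨ ∃ e ∈ curr, v ∈ c e := by
  unfold altExpand
  rw [expand_eq_flat, foldl_altAdd_fst]
  simp [List.mem_flatMap]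

theorem altExpand_snd (c : Int → List Int) (seen : Std.TreeSet Int) (curr : List Int) (v : Int) :
    v ∈ (altExpand c seen curr).2 ↔ v ∉ seen ∧ ∃ e ∈ curr, v ∈ c e := by
  unfold altExpand
  rw [expand_eq_flat, foldl_altAdd_snd]
  simp [List.mem_flatMap]

theorem invBFS_init (c : Int → List Int) (root : Int) :
    InvBFS c root 0 [root] (Std.TreeSet.ofList [root]) := by
  constructor
  · intro v
    rw [reachN_zero]
    simp only [mem_ofList_int, List.mem_singleton, beq_iff_eq]
    exact eq_comm
  · intro v
    rw [reachN_succ_iff, reachN_zero]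
    simp only [List.mem_singleton, beq_iff_eq]
    constructor
    · rintro (h | ⟨y, hy, hr⟩)
      · exact Or.inl h
      · rw [reachN_zero] at hr
        obtain rfl := beq_iff_eq.1 hr
        exact Or.inr ⟨root, rfl, hy⟩
    · rintro (h | ⟨e, rfl, hv⟩)
      · exact Or.inl h
      · exact Or.inr ⟨v, hv, reachN_refl c 0 v⟩

theorem invBFS_step (c : Int → List Int) (root : Int) (j : Nat) (curr : List Int)
    (seen : Std.TreeSet Int) (h : InvBFS c root j curr seen) :
    InvBFS c root (j + 1) (altExpand c seen curr).2 (altExpand c seen curr).1 := by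
  obtain ⟨hS, hC⟩ := h
  constructor
  · intro v
    rw [altExpand_fst]
    rw [hC v]
    constructor
    · rintro (h | h)
      · exact Or.inl ((hS v).1 h)
      · exact Or.inr h
    · rintro (h | h)
      · exact Or.inl ((hS v).2 h)
      · exact Or.inr h
  · intro v
    constructor
    · intro h
      rcases (reachN_last c (j + 1) root v).1 h with h' | ⟨u, hu, hvc⟩
      · exact Or.inl h'
      · rcases (hC u).1 hu with hju | ⟨e, he, huc⟩
        · exact Or.inl ((reachN_last c j root v).2 (Or.inr ⟨u, hju, hvc⟩))
        · by_cases hus : u ∈ seen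
          · have : reachN c j root u = true := (hS u).1 hus
            exact Or.inl ((reachN_last c j root v).2 (Or.inr ⟨u, this, hvc⟩))
          · refine Or.inr ⟨u, ?_, hvc⟩
            rw [altExpand_snd]
            exact ⟨hus, e, he, huc⟩
    · rintro (h | ⟨e, he, hvc⟩)
      · exact reachN_mono c (j + 1) root v h
      · rw [altExpand_snd] at he
        obtain ⟨_, e', he', hec⟩ := he
        have hre : reachN c (j + 1) root e = true := (hC e).2 (Or.inr ⟨e', he', hec⟩)
        exact (reachN_last c (j + 1) root v).2 (Or.inr ⟨e, hre, hvc⟩)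

theorem invBFS_step_rev (c : Int → List Int) (root : Int) (j : Nat) (curr : List Int)
    (seen : Std.TreeSet Int) (h : InvBFS c root j curr seen) :
    InvBFS c root (j + 1) (altExpand c seen curr).2.reverse (altExpand c seen curr).1 :=
  invBFS_of_mem_iff c root (j + 1) _ _ _ (fun _e => (List.mem_reverse).symm)
    (invBFS_step c root j curr seen h)

theorem dual_preds_succs : ∀ p y, p ∈ altPreds y ↔ y ∈ altSuccs p := by
  intro p y
  have h2 : PySem.Int.floordiv p 2 = p / 2 := PySem.Int.floordiv_eq_ediv_of_pos (by norm_num)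
  have h3 : PySem.Int.floordiv (y - 1) 3 = (y - 1) / 3 := PySem.Int.floordiv_eq_ediv_of_pos (by norm_num)
  have hm : PySem.Int.mod y 3 = y % 3 := PySem.Int.mod_eq_emod_of_pos (by norm_num)
  simp only [altPreds, altSuccs, List.mem_append, List.mem_cons,
    List.not_mem_nil, or_false, beq_iff_eq, hm, h2, h3]
  by_cases hy : y % 3 = 1
  · rw [if_pos hy]
    simp only [List.mem_singleton]
    omega
  · rw [if_neg hy]
    simp only [List.not_mem_nil, or_false]
    omega

theorem altDisjoint_iff (s t : Std.TreeSet Int) :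
    altDisjoint s t = true ↔ ∀ v ∈ s, v ∉ t := by
  unfold altDisjoint
  simp only [List.all_eq_true, Std.TreeSet.mem_toList, Bool.not_eq_eq_eq_not, Bool.not_true]
  constructor
  · intro h v hv hvt
    have h2 := h v hv
    rw [Std.TreeSet.contains_iff_mem.2 hvt] at h2
    exact Bool.noConfusion h2
  · intro h v hv
    cases hcv : t.contains v with
    | false => rfl
    | true => exact absurd (Std.TreeSet.contains_iff_mem.1 hcv) (h v hv)

-- the two guards agree: the seen sets meet iff end_ is within a+b forward steps of start
theorem guard_iff (start end_ : Int) (a b : Nat) (currF : List Int) (seenF : Std.TreeSet Int)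
    (currB : List Int) (seenB : Std.TreeSet Int)
    (hF : InvBFS altSuccs start a currF seenF) (hB : InvBFS altPreds end_ b currB seenB) :
    ((∃ v, v ∈ seenF ∧ v ∈ seenB) ↔ reachN altSuccs (a + b) start end_ = true) := by
  rw [reachN_comp]
  constructor
  · rintro ⟨v, hvF, hvB⟩
    exact ⟨v, (hF.1 v).1 hvF, (reachN_dual dual_preds_succs b end_ v).1 ((hB.1 v).1 hvB)⟩
  · rintro ⟨v, hv1, hv2⟩
    exact ⟨v, (hF.1 v).2 hv1, (hB.1 v).2 ((reachN_dual dual_preds_succs b end_ v).2 hv2)⟩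

theorem loop_eq (start end_ : Int) :
    ∀ (fuel : Nat) (k a b : Nat) (currA : List Int) (seenA : Std.TreeSet Int)
      (currF : List Int) (seenF : Std.TreeSet Int) (currB : List Int) (seenB : Std.TreeSet Int),
      a + b = k →
      InvBFS altSuccs start k currA seenA →
      InvBFS altSuccs start a currF seenF →
      InvBFS altPreds end_ b currB seenB →
      collatzyLoop end_ fuel (k : Int) currA seenA = altLoop fuel (k : Int) currF seenF currB seenB := by
  intro fuel
  induction fuel with
  | zero => intro k a b _ _ _ _ _ _ _ _ _ _; simp [collatzyLoop, altLoop]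
  | succ fuel ih =>
    intro k a b currA seenA currF seenF currB seenB hab hA hF hB
    have hguard : (seenA.contains end_ = true) ↔ ¬ (altDisjoint seenF seenB = true) := by
      rw [Std.TreeSet.contains_iff_mem, hA.1 end_, ← hab,
        ← guard_iff start end_ a b currF seenF currB seenB hF hB, altDisjoint_iff]
      push Not
      constructor
      · rintro ⟨v, h1, h2⟩; exact ⟨v, h1, h2⟩
      · rintro ⟨v, h1, h2⟩; exact ⟨v, h1, h2⟩
    have eA : collatzyLoop end_ (fuel + 1) (k : Int) currA seenA
        = if seenA.contains end_ = true then (k : Int)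
          else collatzyLoop end_ fuel ((k : Int) + 1)
            (collatzyExpand seenA currA).2.reverse (collatzyExpand seenA currA).1 := rfl
    have eB : altLoop (fuel + 1) (k : Int) currF seenF currB seenB
        = if altDisjoint seenF seenB = true then
            (if currF.length ≤ currB.length then
              altLoop fuel ((k : Int) + 1)
                (altExpand altSuccs seenF currF).2.reverse (altExpand altSuccs seenF currF).1 currB seenB
            else
              altLoop fuel ((k : Int) + 1) currF seenF
                (altExpand altPreds seenB currB).2.reverse (altExpand altPreds seenB currB).1)
          else (k : Int) := rfl
    rw [eA, eB]
    by_cases hg : seenA.contains end_ = true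
    · rw [if_pos hg, if_neg (hguard.1 hg)]
    · have hd : altDisjoint seenF seenB = true := by
        by_contra h
        exact hg (hguard.2 h)
      have hcE : collatzyExpand seenA currA = altExpand altSuccs seenA currA := rfl
      have hA' := invBFS_step_rev _ _ _ _ _ hA
      have hcast : ((k : Int) + 1) = ((k + 1 : Nat) : Int) := by push_cast; ring
      rw [if_neg hg, if_pos hd, hcE, hcast]
      by_cases hlen : currF.length ≤ currB.length
      · rw [if_pos hlen]
        have hF' := invBFS_step_rev _ _ _ _ _ hF
        exact ih (k + 1) (a + 1) b _ _ _ _ _ _ (by omega) hA' hF' hB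
      · rw [if_neg hlen]
        have hB' := invBFS_step_rev _ _ _ _ _ hB
        exact ih (k + 1) a (b + 1) _ _ _ _ _ _ (by omega) hA' hF hB'

-- ===== VERDICT (by name: the statement is the Claim_ definition above) =====
theorem collatzy_distance_spec : Claim_equal_collatzy_distance := by
  intro start end_ _hdom
  unfold Spec_collatzy_distance collatzy_distance collatzy_distance_alt
  have h0 : ((0 : Nat) : Int) = 0 := rfl
  rw [← h0]
  exact loop_eq start end_ 4294967296 0 0 0 _ _ _ _ _ _ rfl
    (invBFS_init altSuccs start) (invBFS_init altSuccs start) (invBFS_init altPreds end_)
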